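-- pv_equiv track=rewrite | github.com/need-singularity/sylvian-singularity | .shared/calc/bridge_puremath_verifier.py | cyclotomic_at_n
-- ===== SOURCE A (Python) =====
-- def cyclotomic_at_n(m):
--     """Φ_m(m)"""
--     # Φ_n(x) = Π(x - ζ) for primitive n-th roots
--     # For computation: Φ_n(n) = Π_{d|n} (n^d - 1)^{μ(n/d)}
--     result = 1
--     for d in range(1, m+1):
--         if m % d == 0:
--             # μ(m/d)
--             q = m // d
--             temp, mu, facs = q, 1, 0
--             for p in range(2, q+1):
--                 if temp % p == 0:
--                     cnt = 0
--                     while temp % p == 0: cnt += 1; temp //= p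
--                     if cnt > 1: mu = 0; break
--                     facs += 1
--                 if temp == 1: break
--             if mu != 0: mu = (-1)**facs
--             if mu == 1:
--                 result *= (m**d - 1)
--             elif mu == -1:
--                 result //= (m**d - 1) if (m**d - 1) != 0 else 1
--     return result
-- ===== SOURCE B (Python) =====
-- def _mu(q):
--     # Moebius function of q >= 1, via the smallest prime factor
--     if q == 1:
--         return 1
--     p = 2
--     while q % p:
--         p += 1
--     q //= p
--     return 0 if q % p == 0 else -_mu(q)
--
--
-- def cyclotomic_at_n(m):
--     """Φ_m(m)"""
--     # divisors of m, found by trial division up to sqrt(m)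
--     small = []
--     d = 1
--     while d * d <= m:
--         if m % d == 0:
--             small.append(d)
--         d += 1
--     divs = set(small)
--     for d in small:
--         divs.add(m // d)
--     result = 1
--     for d in sorted(divs):
--         mu = _mu(m // d)
--         if mu == 1:
--             result *= m ** d - 1
--         elif mu == -1:
--             result //= m ** d - 1
--     return result
-- ===== Notes on version B (the rewrite author's own statement) =====
-- stated objective: alternative
-- what changed: B finds the divisors of m by trial division up to sqrt(m) and sorts them instead of scanning all of 1..m, and computes each Moebius value mu(m/d) by recursion on the smallest prime factor instead of A's bounded for-loop with breaks, keeping the same ascending interleaving of multiplications and floor divisions.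
import Mathlib
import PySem

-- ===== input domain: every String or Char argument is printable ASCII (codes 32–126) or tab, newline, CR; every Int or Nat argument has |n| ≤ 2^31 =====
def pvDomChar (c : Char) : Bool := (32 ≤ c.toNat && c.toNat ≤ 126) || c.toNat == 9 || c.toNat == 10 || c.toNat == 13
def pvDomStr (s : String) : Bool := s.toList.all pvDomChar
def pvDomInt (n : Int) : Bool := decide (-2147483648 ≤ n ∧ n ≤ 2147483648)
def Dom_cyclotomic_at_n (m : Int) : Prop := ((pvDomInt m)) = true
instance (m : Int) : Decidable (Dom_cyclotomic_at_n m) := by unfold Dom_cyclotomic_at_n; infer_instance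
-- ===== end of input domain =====

-- B collects the divisors of m by trial division up to √m and sorts them, and computes μ by recursion
-- on the smallest prime factor, instead of A's full 1..m scan with an inner 2..q loop; the ascending
-- interleaving of multiplications and floor divisions is kept, so the returned value is identical.

-- ===== PORT A =====
-- inner `while temp % p == 0: cnt += 1; temp //= p`, on fuel temp.toNat (the loop variable strictly
-- decreases and stays ≥ 1, so the fuel never runs out; the 1 ≤ temp / 2 ≤ p guards only ensure totality)
def pvDivOutGo (p : Int) : Nat → Int → Int → Int × Int
  | 0, temp, cnt => (cnt, temp)
  | fuel + 1, temp, cnt =>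
    if PySem.Int.mod temp p = 0 ∧ 1 ≤ temp ∧ 2 ≤ p then
      pvDivOutGo p fuel (PySem.Int.floordiv temp p) (cnt + 1)
    else (cnt, temp)

def pvDivOut (p temp cnt : Int) : Int × Int := pvDivOutGo p temp.toNat temp cnt

-- `for p in range(2, q+1): …` of A's μ computation; returns the final (mu, facs)
def pvMuLoop : List Int → Int → Int → Int → Int × Int
  | [], _temp, mu, facs => (mu, facs)
  | p :: ps, temp, mu, facs =>
    if PySem.Int.mod temp p = 0 then
      let r := pvDivOut p temp 0
      if 1 < r.1 then (0, facs)
      else if r.2 = 1 then (mu, facs + 1)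
      else pvMuLoop ps r.2 mu (facs + 1)
    else if temp = 1 then (mu, facs)
    else pvMuLoop ps temp mu facs

-- one iteration of A's outer loop body
def pvAStep (m result d : Int) : Int :=
  if PySem.Int.mod m d = 0 then
    let q := PySem.Int.floordiv m d
    let r := pvMuLoop (PySem.List.pyRange 2 (q + 1)) q 1 0
    let mu := if r.1 ≠ 0 then (-1 : Int) ^ r.2.toNat else r.1
    if mu = 1 then result * (m ^ d.toNat - 1)
    else if mu = -1 then
      PySem.Int.floordiv result (if m ^ d.toNat - 1 ≠ 0 then m ^ d.toNat - 1 else 1)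
    else result
  else result

def cyclotomic_at_n (m : Int) : Int :=
  (PySem.List.pyRange 1 (m + 1)).foldl (pvAStep m) 1

-- ===== PORT B =====
-- `while q % p: p += 1` of _mu, on fuel (q - p).toNat (the p < q guard only ensures totality;
-- q % q == 0, so for the calls made the loop stops no later than p = q)
def pvFindPGo (q : Int) : Nat → Int → Int
  | 0, p => p
  | fuel + 1, p => if ¬ PySem.Int.mod q p = 0 ∧ p < q then pvFindPGo q fuel (p + 1) else p

def pvFindP (q p : Int) : Int := pvFindPGo q (q - p).toNat p

-- _mu, on fuel q.toNat (the recursion argument strictly decreases; the 2 ≤ q guard only ensures totality)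
def pvMuGo : Nat → Int → Int
  | 0, _ => 0
  | fuel + 1, q =>
    if q = 1 then 1
    else if 2 ≤ q then
      let p := pvFindP q 2
      let q' := PySem.Int.floordiv q p
      if PySem.Int.mod q' p = 0 then 0 else -pvMuGo fuel q'
    else 0

def pvMu (q : Int) : Int := pvMuGo q.toNat q

-- `while d*d <= m: …` collecting the small divisors, on fuel (m + 1 - d).toNat
-- (d*d ≤ m forces d ≤ m, so the fuel never runs out)
def pvSmallGo (m : Int) : Nat → Int → List Int
  | 0, _ => []
  | fuel + 1, d =>
    if d * d ≤ m then
      (if PySem.Int.mod m d = 0 then [d] else []) ++ pvSmallGo m fuel (d + 1)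
    else []

def pvSmall (m d : Int) : List Int := pvSmallGo m (m + 1 - d).toNat d

-- `divs = set(small); for d in small: divs.add(m // d); sorted(divs)`
def pvDivisors (m : Int) : List Int :=
  let small := pvSmall m 1
  let divs := small.foldl (fun s d => PySem.Set.add s (PySem.Int.floordiv m d)) (PySem.Set.ofList small)
  PySem.List.sorted divs (fun x => x)

-- one iteration of B's loop body
def pvBStep (m result d : Int) : Int :=
  let mu := pvMu (PySem.Int.floordiv m d)
  if mu = 1 then result * (m ^ d.toNat - 1)
  else if mu = -1 then PySem.Int.floordiv result (m ^ d.toNat - 1)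
  else result

def cyclotomic_at_n_alt (m : Int) : Int :=
  (pvDivisors m).foldl (pvBStep m) 1

-- ===== PRECONDITION & SPEC =====
def Spec_cyclotomic_at_n (m : Int) (out : Int) : Prop := out = cyclotomic_at_n_alt m
instance (m : Int) (out : Int) : Decidable (Spec_cyclotomic_at_n m out) := by unfold Spec_cyclotomic_at_n; infer_instance

-- ===== CLAIM (what is proved, stated in full; the proofs are below) =====
def Claim_equal_cyclotomic_at_n : Prop := ∀ (m : Int), Dom_cyclotomic_at_n m → Spec_cyclotomic_at_n m (cyclotomic_at_n m)

-- ===== LEMMAS AND PROOFS =====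

-- A's post-processing `if mu != 0: mu = (-1)**facs` of the result of the inner loop
def pvPost (r : Int × Int) : Int := if r.1 ≠ 0 then (-1 : Int) ^ r.2.toNat else r.1

theorem pv_fdiv_lt (temp p : Int) (h1 : 1 ≤ temp) (hp : 2 ≤ p) :
    0 ≤ PySem.Int.floordiv temp p ∧ PySem.Int.floordiv temp p < temp := by
  rw [PySem.Int.floordiv_eq_ediv_of_pos (by omega : (0:Int) < p)]
  refine ⟨Int.ediv_nonneg (by omega) (by omega), ?_⟩
  rw [Int.ediv_lt_iff_lt_mul (by omega : (0:Int) < p)]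
  nlinarith

theorem pvDivOutGo_congr (p : Int) :
    ∀ (f g : Nat) (temp cnt : Int), temp.toNat ≤ f → temp.toNat ≤ g →
      pvDivOutGo p f temp cnt = pvDivOutGo p g temp cnt := by
  intro f
  induction f with
  | zero =>
      intro g temp cnt hf hg
      cases g with
      | zero => rfl
      | succ g =>
          simp only [pvDivOutGo]
          rw [if_neg (by rintro ⟨-, h1, -⟩; omega)]
  | succ f ih =>
      intro g temp cnt hf hg
      by_cases hguard : PySem.Int.mod temp p = 0 ∧ 1 ≤ temp ∧ 2 ≤ p
      · obtain ⟨hd0, hdlt⟩ := pv_fdiv_lt temp p hguard.2.1 hguard.2.2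
        cases g with
        | zero => omega
        | succ g =>
            simp only [pvDivOutGo, if_pos hguard]
            exact ih g _ _ (by omega) (by omega)
      · cases g with
        | zero => simp only [pvDivOutGo, if_neg hguard]
        | succ g => simp only [pvDivOutGo, if_neg hguard]

theorem pvDivOut_eq (p temp cnt : Int) :
    pvDivOut p temp cnt =
      if PySem.Int.mod temp p = 0 ∧ 1 ≤ temp ∧ 2 ≤ p then
        pvDivOut p (PySem.Int.floordiv temp p) (cnt + 1)
      else (cnt, temp) := by
  unfold pvDivOut
  by_cases hguard : PySem.Int.mod temp p = 0 ∧ 1 ≤ temp ∧ 2 ≤ p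
  · obtain ⟨hd0, hdlt⟩ := pv_fdiv_lt temp p hguard.2.1 hguard.2.2
    rw [if_pos hguard, show temp.toNat = (temp.toNat - 1) + 1 from by omega]
    simp only [pvDivOutGo, if_pos hguard]
    exact pvDivOutGo_congr p (temp.toNat - 1) (PySem.Int.floordiv temp p).toNat _ _
      (by omega) le_rfl
  · rw [if_neg hguard]
    cases h : temp.toNat with
    | zero => rfl
    | succ f => simp only [pvDivOutGo, if_neg hguard]

theorem pvFindPGo_congr (q : Int) :
    ∀ (f g : Nat) (p : Int), (q - p).toNat ≤ f → (q - p).toNat ≤ g →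
      pvFindPGo q f p = pvFindPGo q g p := by
  intro f
  induction f with
  | zero =>
      intro g p hf hg
      cases g with
      | zero => rfl
      | succ g =>
          simp only [pvFindPGo]
          rw [if_neg (by rintro ⟨-, h1⟩; omega)]
  | succ f ih =>
      intro g p hf hg
      by_cases hguard : ¬ PySem.Int.mod q p = 0 ∧ p < q
      · cases g with
        | zero => omega
        | succ g =>
            simp only [pvFindPGo, if_pos hguard]
            exact ih g _ (by omega) (by omega)
      · cases g with
        | zero => simp only [pvFindPGo, if_neg hguard]
        | succ g => simp only [pvFindPGo, if_neg hguard]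

theorem pvFindP_eq (q p : Int) :
    pvFindP q p = if ¬ PySem.Int.mod q p = 0 ∧ p < q then pvFindP q (p + 1) else p := by
  unfold pvFindP
  by_cases hguard : ¬ PySem.Int.mod q p = 0 ∧ p < q
  · rw [if_pos hguard, show (q - p).toNat = ((q - p).toNat - 1) + 1 from by omega]
    simp only [pvFindPGo, if_pos hguard]
    exact pvFindPGo_congr q ((q - p).toNat - 1) (q - (p + 1)).toNat _ (by omega) le_rfl
  · rw [if_neg hguard]
    cases h : (q - p).toNat with
    | zero => rfl
    | succ f => simp only [pvFindPGo, if_neg hguard]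

theorem le_pvFindP (q p : Int) : p ≤ pvFindP q p := by
  unfold pvFindP
  generalize (q - p).toNat = f
  induction f generalizing p with
  | zero => simp [pvFindPGo]
  | succ f ih =>
      simp only [pvFindPGo]
      by_cases hguard : ¬ PySem.Int.mod q p = 0 ∧ p < q
      · rw [if_pos hguard]
        have := ih (p + 1)
        -- ih is about pvFindP-unfolded; restated below
        omega
      · rw [if_neg hguard]

theorem pvMuGo_congr :
    ∀ (f g : Nat) (q : Int), q.toNat ≤ f → q.toNat ≤ g → pvMuGo f q = pvMuGo g q := by
  intro f
  induction f with
  | zero =>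
      intro g q hf hg
      cases g with
      | zero => rfl
      | succ g =>
          simp only [pvMuGo]
          rw [if_neg (by omega), if_neg (by omega)]
  | succ f ih =>
      intro g q hf hg
      by_cases h1 : q = 1
      · cases g with
        | zero => omega
        | succ g => simp only [pvMuGo, if_pos h1]
      · by_cases h2 : 2 ≤ q
        · cases g with
          | zero => omega
          | succ g =>
              simp only [pvMuGo, if_neg h1, if_pos h2]
              have hp : 2 ≤ pvFindP q 2 := le_pvFindP q 2
              obtain ⟨hd0, hdlt⟩ := pv_fdiv_lt q (pvFindP q 2) (by omega) hp
              by_cases hmod : PySem.Int.mod (PySem.Int.floordiv q (pvFindP q 2)) (pvFindP q 2) = 0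
              · rw [if_pos hmod, if_pos hmod]
              · rw [if_neg hmod, if_neg hmod, ih g _ (by omega) (by omega)]
        · cases g with
          | zero => simp only [pvMuGo]; rw [if_neg h1, if_neg h2]
          | succ g => simp only [pvMuGo, if_neg h1, if_neg h2]

theorem pvMu_eq (q : Int) :
    pvMu q = if q = 1 then 1
      else if 2 ≤ q then
        (if PySem.Int.mod (PySem.Int.floordiv q (pvFindP q 2)) (pvFindP q 2) = 0 then 0
         else -pvMu (PySem.Int.floordiv q (pvFindP q 2)))
      else 0 := by
  unfold pvMu
  by_cases h1 : q = 1
  · subst h1; simp [pvMuGo]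
  · by_cases h2 : 2 ≤ q
    · rw [if_neg h1, if_pos h2, show q.toNat = (q.toNat - 1) + 1 from by omega]
      simp only [pvMuGo, if_neg h1, if_pos h2]
      have hp : 2 ≤ pvFindP q 2 := le_pvFindP q 2
      obtain ⟨hd0, hdlt⟩ := pv_fdiv_lt q (pvFindP q 2) (by omega) hp
      by_cases hmod : PySem.Int.mod (PySem.Int.floordiv q (pvFindP q 2)) (pvFindP q 2) = 0
      · rw [if_pos hmod, if_pos hmod]
      · rw [if_neg hmod, if_neg hmod,
          pvMuGo_congr (q.toNat - 1) (PySem.Int.floordiv q (pvFindP q 2)).toNat _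
            (by omega) le_rfl]
    · rw [if_neg h1, if_neg h2, show q.toNat = 0 from by omega]
      rfl

theorem pv_dsq_le (m d : Int) (h : d * d ≤ m) : d ≤ m := by
  by_cases h0 : d ≤ 0 <;> nlinarith

theorem pvSmallGo_congr (m : Int) :
    ∀ (f g : Nat) (d : Int), (m + 1 - d).toNat ≤ f → (m + 1 - d).toNat ≤ g →
      pvSmallGo m f d = pvSmallGo m g d := by
  intro f
  induction f with
  | zero =>
      intro g d hf hg
      cases g with
      | zero => rfl
      | succ g =>
          simp only [pvSmallGo]
          rw [if_neg (fun hc => by have := pv_dsq_le m d hc; omega)]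
  | succ f ih =>
      intro g d hf hg
      by_cases hguard : d * d ≤ m
      · have hdm := pv_dsq_le m d hguard
        cases g with
        | zero => omega
        | succ g =>
            simp only [pvSmallGo, if_pos hguard]
            rw [ih g (d + 1) (by omega) (by omega)]
      · cases g with
        | zero => simp only [pvSmallGo, if_neg hguard]
        | succ g => simp only [pvSmallGo, if_neg hguard]

theorem pvSmall_eq (m d : Int) :
    pvSmall m d = if d * d ≤ m then
        (if PySem.Int.mod m d = 0 then [d] else []) ++ pvSmall m (d + 1)
      else [] := by
  unfold pvSmall
  by_cases hguard : d * d ≤ m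
  · have hdm := pv_dsq_le m d hguard
    rw [if_pos hguard, show (m + 1 - d).toNat = ((m + 1 - d).toNat - 1) + 1 from by omega]
    simp only [pvSmallGo, if_pos hguard]
    rw [pvSmallGo_congr m ((m + 1 - d).toNat - 1) (m + 1 - (d + 1)).toNat _ (by omega) le_rfl]
  · rw [if_neg hguard]
    cases h : (m + 1 - d).toNat with
    | zero => rfl
    | succ f => simp only [pvSmallGo, if_neg hguard]

theorem pvDivOutGo_cnt_le (p : Int) :
    ∀ (f : Nat) (t c : Int), c ≤ (pvDivOutGo p f t c).1 := by
  intro f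
  induction f with
  | zero => intro t c; exact le_rfl
  | succ f ih =>
      intro t c
      simp only [pvDivOutGo]
      by_cases hguard : PySem.Int.mod t p = 0 ∧ 1 ≤ t ∧ 2 ≤ p
      · rw [if_pos hguard]
        have := ih (PySem.Int.floordiv t p) (c + 1)
        omega
      · rw [if_neg hguard]

theorem pvDivOut_cnt_le (p t c : Int) : c ≤ (pvDivOut p t c).1 :=
  pvDivOutGo_cnt_le p t.toNat t c

theorem pv_fdiv_fact (m x : Int) (hm : 1 ≤ m) (hx : 1 ≤ x) (hdvd : x ∣ m) :
    PySem.Int.floordiv m x = m / x ∧ 1 ≤ m / x ∧ m = x * (m / x) ∧ m = m / x * x := by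
  have h1 : PySem.Int.floordiv m x = m / x := PySem.Int.floordiv_eq_ediv_of_pos (by omega)
  have h2 : m / x * x = m := Int.ediv_mul_cancel hdvd
  have h3 : 1 ≤ m / x := by nlinarith
  exact ⟨h1, h3, by linarith, h2.symm⟩

theorem pvDivOut_single (p t : Int) (hp : 2 ≤ p) (ht : 1 ≤ t) (hd : p ∣ t) (hnd : ¬ p * p ∣ t) :
    pvDivOut p t 0 = (1, PySem.Int.floordiv t p) := by
  obtain ⟨hfd, ht', hmt, hmt'⟩ := pv_fdiv_fact t p ht (by omega) hd
  have hmod : PySem.Int.mod t p = 0 := (PySem.Int.mod_eq_zero_iff_dvd t p).mpr hd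
  have hnd2 : ¬ p ∣ t / p := by
    rintro ⟨k, hk⟩
    exact hnd ⟨k, by rw [hmt, hk]; ring⟩
  have hmod2 : ¬ PySem.Int.mod (t / p) p = 0 := fun h =>
    hnd2 ((PySem.Int.mod_eq_zero_iff_dvd _ p).mp h)
  rw [pvDivOut_eq, if_pos ⟨hmod, ht, hp⟩, hfd, pvDivOut_eq, if_neg (by tauto)]
  norm_num

theorem pvDivOut_sq (p t : Int) (hp : 2 ≤ p) (ht : 1 ≤ t) (hd : p * p ∣ t) :
    1 < (pvDivOut p t 0).1 := by
  obtain ⟨k, hk⟩ := hd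
  have hk1 : 1 ≤ k := by nlinarith
  have hdp : p ∣ t := ⟨p * k, by rw [hk]; ring⟩
  obtain ⟨hfd, ht', hmt, hmt'⟩ := pv_fdiv_fact t p ht (by omega) hdp
  have hq1 : t / p = p * k := by
    have : t = p * (p * k) := by rw [hk]; ring
    rw [this, Int.mul_ediv_cancel_left _ (by omega)]
  have hdp2 : p ∣ t / p := by rw [hq1]; exact ⟨k, rfl⟩
  have hmod : PySem.Int.mod t p = 0 := (PySem.Int.mod_eq_zero_iff_dvd t p).mpr hdp
  have hmod2 : PySem.Int.mod (t / p) p = 0 := (PySem.Int.mod_eq_zero_iff_dvd _ p).mpr hdp2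
  rw [pvDivOut_eq, if_pos ⟨hmod, ht, hp⟩, hfd, pvDivOut_eq,
    if_pos ⟨hmod2, by omega, hp⟩]
  have := pvDivOut_cnt_le p (PySem.Int.floordiv (t / p) p) (0 + 1 + 1)
  omega

theorem pvFindP_spec (q p : Int) (hp : 2 ≤ p) (hq : p ≤ q) :
    p ≤ pvFindP q p ∧ pvFindP q p ≤ q ∧ PySem.Int.mod q (pvFindP q p) = 0 ∧
      ∀ k, p ≤ k → k < pvFindP q p → ¬ PySem.Int.mod q k = 0 := by
  have hmqq : PySem.Int.mod q q = 0 := (PySem.Int.mod_eq_zero_iff_dvd q q).mpr dvd_rfl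
  obtain ⟨n, hn⟩ : ∃ n : ℕ, (q - p).toNat ≤ n := ⟨(q - p).toNat, le_rfl⟩
  induction n generalizing p with
  | zero =>
      have hpq' : p = q := by omega
      subst hpq'
      rw [pvFindP_eq, if_neg (by simp [hmqq])]
      exact ⟨le_rfl, le_rfl, hmqq, fun k h1 h2 => by omega⟩
  | succ n ih =>
      by_cases hmod : PySem.Int.mod q p = 0
      · rw [pvFindP_eq, if_neg (by tauto)]
        exact ⟨le_rfl, hq, hmod, fun k h1 h2 => by omega⟩
      · have hplt : p < q := by
          rcases lt_or_eq_of_le hq with h | h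
          · exact h
          · exact absurd (h ▸ hmqq) hmod
        rw [pvFindP_eq, if_pos ⟨hmod, hplt⟩]
        obtain ⟨ih1, ih2, ih3, ih4⟩ := ih (p + 1) (by omega) (by omega) (by omega)
        refine ⟨by omega, ih2, ih3, fun k h1 h2 => ?_⟩
        rcases eq_or_lt_of_le h1 with h | h
        · exact h ▸ hmod
        · exact ih4 k (by omega) h2

theorem muLoop_skip (temp mu facs : Int) (ht : temp ≠ 1) :
    ∀ (n : ℕ) (a b c : Int), (b - a).toNat ≤ n → a ≤ b → b ≤ c →
      (∀ k, a ≤ k → k < b → ¬ PySem.Int.mod temp k = 0) →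
      pvMuLoop (PySem.List.pyRange a c) temp mu facs = pvMuLoop (PySem.List.pyRange b c) temp mu facs := by
  intro n
  induction n with
  | zero =>
      intro a b c hn hab hbc hdiv
      have hba : a = b := by omega
      rw [hba]
  | succ n ih =>
      intro a b c hn hab hbc hdiv
      rcases eq_or_lt_of_le hab with h | hab'
      · rw [h]
      · rw [PySem.List.pyRange_one_cons (by omega)]
        simp only [pvMuLoop]
        rw [if_neg (hdiv a le_rfl hab'), if_neg ht]
        exact ih (a + 1) b c (by omega) (by omega) hbc (fun k hk1 hk2 => hdiv k (by omega) hk2)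

theorem muLoop_eq_mu :
    ∀ (n : ℕ) (temp : Int), temp.toNat ≤ n → 1 ≤ temp →
      ∀ (q a facs : Int), temp ∣ q → 1 ≤ q → 2 ≤ a → 0 ≤ facs →
        (∀ k, 2 ≤ k → k < a → ¬ PySem.Int.mod temp k = 0) →
        pvPost (pvMuLoop (PySem.List.pyRange a (q + 1)) temp 1 facs) = (-1) ^ facs.toNat * pvMu temp := by
  intro n
  induction n with
  | zero => intro temp hle h1; omega
  | succ n ih =>
      intro temp hle h1 q a facs hdvd hq ha hfacs hinv
      by_cases ht1 : temp = 1
      · subst ht1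
        have hmu : pvMu 1 = 1 := by rw [pvMu_eq]; simp
        rw [hmu, mul_one]
        by_cases hrange : a < q + 1
        · rw [PySem.List.pyRange_one_cons hrange]
          simp only [pvMuLoop]
          have hmod : ¬ PySem.Int.mod 1 a = 0 := by
            rw [PySem.Int.mod_eq_zero_iff_dvd]
            intro hdvd'
            have := Int.le_of_dvd one_pos hdvd'
            omega
          rw [if_neg hmod]
          simp [pvPost]
        · rw [PySem.List.pyRange_one_eq_nil (by omega)]
          simp [pvMuLoop, pvPost]
      · have ht2 : 2 ≤ temp := by omega
        obtain ⟨hple, hpq, hpmod, hpmin⟩ := pvFindP_spec temp 2 le_rfl ht2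
        set p0 := pvFindP temp 2 with hp0def
        have hp0a : a ≤ p0 := by
          by_contra hcon
          exact hinv p0 hple (by omega) hpmod
        have htq : temp ≤ q := Int.le_of_dvd (by omega) hdvd
        have hdvd_p : p0 ∣ temp := (PySem.Int.mod_eq_zero_iff_dvd _ _).mp hpmod
        rw [muLoop_skip temp 1 facs ht1 (p0 - a).toNat a p0 (q + 1) le_rfl hp0a (by omega)
          (fun k hk1 hk2 => hpmin k (by omega) hk2)]
        rw [PySem.List.pyRange_one_cons (by omega)]
        simp only [pvMuLoop]
        rw [if_pos hpmod]
        obtain ⟨hfd, ht', hmt, hmt'⟩ := pv_fdiv_fact temp p0 (by omega) (by omega) hdvd_p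
        have hmuval : pvMu temp = (if PySem.Int.mod (PySem.Int.floordiv temp p0) p0 = 0 then 0
            else -pvMu (PySem.Int.floordiv temp p0)) := by
          rw [pvMu_eq, if_neg ht1, if_pos ht2, ← hp0def]
        by_cases hsq : p0 * p0 ∣ temp
        · have hcnt := pvDivOut_sq p0 temp hple (by omega) hsq
          rw [if_pos hcnt]
          have hdp2 : p0 ∣ temp / p0 := by
            obtain ⟨k, hk⟩ := hsq
            refine ⟨k, ?_⟩
            have : temp = p0 * (p0 * k) := by rw [hk]; ring
            rw [this, Int.mul_ediv_cancel_left _ (by omega)]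
          have hmod2 : PySem.Int.mod (PySem.Int.floordiv temp p0) p0 = 0 := by
            rw [hfd]; exact (PySem.Int.mod_eq_zero_iff_dvd _ _).mpr hdp2
          rw [hmuval, if_pos hmod2]
          simp [pvPost]
        · rw [pvDivOut_single p0 temp hple (by omega) hdvd_p hsq]
          simp only []
          norm_num
          have hdvd_t' : temp / p0 ∣ temp := ⟨p0, hmt'⟩
          have hnd2 : ¬ p0 ∣ temp / p0 := by
            rintro ⟨k, hk⟩
            exact hsq ⟨k, by rw [hmt, hk]; ring⟩
          have hmod2 : ¬ PySem.Int.mod (PySem.Int.floordiv temp p0) p0 = 0 := by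
            rw [hfd]
            exact fun h => hnd2 ((PySem.Int.mod_eq_zero_iff_dvd _ _).mp h)
          have hfacs1 : (facs + 1).toNat = facs.toNat + 1 := by omega
          rw [hmuval, if_neg hmod2]
          by_cases ht'1 : PySem.Int.floordiv temp p0 = 1
          · rw [if_pos ht'1, ht'1]
            have hmu1 : pvMu 1 = 1 := by rw [pvMu_eq]; simp
            rw [hmu1]
            simp only [pvPost]
            norm_num [hfacs1, pow_succ]
          · rw [if_neg ht'1]
            have hlt : temp / p0 < temp := by
              have : temp < temp * p0 := by nlinarith
              rw [Int.ediv_lt_iff_lt_mul (by omega : (0:Int) < p0)]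
              exact this
            have hrec := ih (temp / p0) (by omega) ht' q (p0 + 1) (facs + 1)
              (dvd_trans hdvd_t' hdvd) hq (by omega) (by omega)
              (fun k hk1 hk2 => ?_)
            · rw [hfd] at *
              rw [hrec, hfacs1, pow_succ]
              ring
            · rcases eq_or_lt_of_le (by omega : k ≤ p0) with h | h
              · subst h
                exact fun hc => hnd2 ((PySem.Int.mod_eq_zero_iff_dvd _ _).mp hc)
              · intro hc
                have hkd : k ∣ temp / p0 := (PySem.Int.mod_eq_zero_iff_dvd _ _).mp hc
                exact hpmin k (by omega) h ((PySem.Int.mod_eq_zero_iff_dvd _ _).mpr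
                  (dvd_trans hkd hdvd_t'))

theorem pvMu_eq_neg_one_imp (q : Int) (h : pvMu q = -1) : 2 ≤ q := by
  by_contra hq
  rw [pvMu_eq] at h
  rcases eq_or_ne q 1 with h1 | h1
  · simp [h1] at h
  · rw [if_neg h1, if_neg (by omega)] at h; omega

theorem step_eq (m d : Int) (hm : 1 ≤ m) (hd1 : 1 ≤ d) (_hdm : d ≤ m)
    (hdv : PySem.Int.mod m d = 0) (r : Int) : pvAStep m r d = pvBStep m r d := by
  have hdvd : d ∣ m := (PySem.Int.mod_eq_zero_iff_dvd _ _).mp hdv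
  obtain ⟨hfd, hq1, hmq, hmq'⟩ := pv_fdiv_fact m d hm hd1 hdvd
  have hmu : pvPost (pvMuLoop (PySem.List.pyRange 2 (PySem.Int.floordiv m d + 1))
      (PySem.Int.floordiv m d) 1 0) = pvMu (PySem.Int.floordiv m d) := by
    have := muLoop_eq_mu (PySem.Int.floordiv m d).toNat (PySem.Int.floordiv m d) le_rfl
      (by omega) (PySem.Int.floordiv m d) 2 0 dvd_rfl (by omega) le_rfl le_rfl
      (fun k hk1 hk2 => by omega)
    simpa using this
  simp only [pvAStep, pvBStep, if_pos hdv]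
  simp only [pvPost] at hmu
  rw [hmu]
  by_cases h1 : pvMu (PySem.Int.floordiv m d) = 1
  · simp [h1]
  · by_cases h2 : pvMu (PySem.Int.floordiv m d) = -1
    · have hq2 : 2 ≤ PySem.Int.floordiv m d := pvMu_eq_neg_one_imp _ h2
      have hm2 : 2 ≤ m := by nlinarith
      have hpow : m ≤ m ^ d.toNat := le_self_pow₀ (by omega) (by omega)
      have hne : m ^ d.toNat - 1 ≠ 0 := by omega
      simp [h2, hne]
    · simp [h1, h2]

theorem mem_pvSmall (m : Int) :
    ∀ (n : ℕ) (a : Int), (m + 1 - a).toNat ≤ n → 1 ≤ a →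
      ∀ x, x ∈ pvSmall m a ↔ a ≤ x ∧ x * x ≤ m ∧ PySem.Int.mod m x = 0 := by
  intro n
  induction n with
  | zero =>
      intro a hn ha1 x
      have ham : m < a := by omega
      rw [pvSmall_eq, if_neg (by nlinarith)]
      simp only [List.not_mem_nil, false_iff]
      rintro ⟨hax, hxx, -⟩
      nlinarith
  | succ n ih =>
      intro a hn ha1 x
      rw [pvSmall_eq]
      by_cases hle : a * a ≤ m
      · rw [if_pos hle, List.mem_append, ih (a + 1) (by omega) (by omega) x]
        by_cases hxa : x = a
        · subst hxa
          constructor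
          · rintro (h | ⟨h, -, -⟩)
            · refine ⟨le_rfl, hle, ?_⟩
              by_contra hmod
              rw [if_neg hmod] at h
              exact absurd h (List.not_mem_nil)
            · omega
          · rintro ⟨-, -, hmod⟩
            left
            rw [if_pos hmod]
            exact List.mem_singleton_self x
        · constructor
          · rintro (h | ⟨h1, h2, h3⟩)
            · exfalso
              apply hxa
              by_cases hmod : PySem.Int.mod m a = 0
              · rw [if_pos hmod] at h; simpa using h
              · rw [if_neg hmod] at h; exact absurd h (List.not_mem_nil)
            · exact ⟨by omega, h2, h3⟩
          · rintro ⟨h1, h2, h3⟩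
            right
            exact ⟨by omega, h2, h3⟩
      · rw [if_neg hle]
        simp only [List.not_mem_nil, false_iff]
        rintro ⟨hax, hxx, -⟩
        nlinarith

theorem mem_foldl_add (f : Int → Int) :
    ∀ (l : List Int) (s : PySem.Set Int) (x : Int),
      x ∈ l.foldl (fun s d => PySem.Set.add s (f d)) s ↔ x ∈ s ∨ ∃ d ∈ l, x = f d := by
  intro l
  induction l with
  | nil => simp
  | cons d l ih =>
      intro s x
      simp only [List.foldl_cons, ih, PySem.Set.mem_add, List.mem_cons]
      constructor
      · rintro ((h | h) | ⟨e, he, hx⟩)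
        · exact Or.inl h
        · exact Or.inr ⟨d, Or.inl rfl, h⟩
        · exact Or.inr ⟨e, Or.inr he, hx⟩
      · rintro (h | ⟨e, (rfl | he), hx⟩)
        · exact Or.inl (Or.inl h)
        · exact Or.inl (Or.inr hx)
        · exact Or.inr ⟨e, he, hx⟩

theorem nodup_foldl_add (f : Int → Int) :
    ∀ (l : List Int) (s : PySem.Set Int), s.Nodup →
      (l.foldl (fun s d => PySem.Set.add s (f d)) s).Nodup := by
  intro l
  induction l with
  | nil => exact fun s h => h
  | cons d l ih => exact fun s h => ih _ (PySem.Set.nodup_add s (f d) h)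

theorem divisors_eq (m : Int) (hm : 1 ≤ m) :
    pvDivisors m = (PySem.List.pyRange 1 (m + 1)).filter (fun d => decide (PySem.Int.mod m d = 0)) := by
  unfold pvDivisors
  apply PySem.List.sorted_eq_of_perm_of_pairwise_lt
  · rw [List.perm_ext_iff_of_nodup ((PySem.List.nodup_pyRange_one 1 (m + 1)).filter _)
      (nodup_foldl_add _ _ _ (PySem.Set.nodup_ofList _))]
    intro x
    rw [List.mem_filter, PySem.List.mem_pyRange_one, mem_foldl_add, PySem.Set.mem_ofList]
    have hsmall : ∀ y, y ∈ pvSmall m 1 ↔ 1 ≤ y ∧ y * y ≤ m ∧ PySem.Int.mod m y = 0 :=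
      mem_pvSmall m m.toNat 1 (by omega) le_rfl
    constructor
    · rintro ⟨⟨h1x, hxm1⟩, hmodx⟩
      rw [decide_eq_true_eq] at hmodx
      by_cases hxx : x * x ≤ m
      · exact Or.inl ((hsmall x).mpr ⟨h1x, hxx, hmodx⟩)
      · right
        have hdvd : x ∣ m := (PySem.Int.mod_eq_zero_iff_dvd _ _).mp hmodx
        obtain ⟨hfd, he1, hme, hme'⟩ := pv_fdiv_fact m x hm h1x hdvd
        refine ⟨m / x, ?_, ?_⟩
        · rw [hsmall]
          have hex : m / x < x := by nlinarith
          refine ⟨he1, by nlinarith, ?_⟩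
          exact (PySem.Int.mod_eq_zero_iff_dvd _ _).mpr ⟨x, hme'⟩
        · set e := m / x with hedef
          rw [PySem.Int.floordiv_eq_ediv_of_pos (by linarith : (0:Int) < e), hme',
            Int.mul_ediv_cancel_left x (by linarith : e ≠ 0)]
    · rintro (hx | ⟨dd, hdd, rfl⟩)
      · rw [hsmall] at hx
        obtain ⟨h1x, hxx, hmodx⟩ := hx
        exact ⟨⟨h1x, by nlinarith⟩, by simpa using hmodx⟩
      · rw [hsmall] at hdd
        obtain ⟨h1d, hdd2, hmodd⟩ := hdd
        have hdvd : dd ∣ m := (PySem.Int.mod_eq_zero_iff_dvd _ _).mp hmodd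
        obtain ⟨hfd, he1, hme, hme'⟩ := pv_fdiv_fact m dd hm h1d hdvd
        rw [hfd]
        refine ⟨⟨he1, ?_⟩, ?_⟩
        · nlinarith
        · rw [decide_eq_true_eq]
          exact (PySem.Int.mod_eq_zero_iff_dvd _ _).mpr ⟨dd, by linarith⟩
  · exact (PySem.List.pairwise_lt_pyRange_one 1 (m + 1)).filter _

-- ===== VERDICT (by name: the statement is the Claim_ definition above) =====
theorem cyclotomic_at_n_spec : Claim_equal_cyclotomic_at_n := by
  intro m _
  unfold Spec_cyclotomic_at_n cyclotomic_at_n cyclotomic_at_n_alt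
  by_cases hm : m ≤ 0
  · rw [PySem.List.pyRange_one_eq_nil (by omega)]
    have hsmall : pvSmall m 1 = [] := by rw [pvSmall_eq, if_neg (by omega)]
    simp only [pvDivisors, hsmall, List.foldl_nil]
    rfl
  · have hm1 : 1 ≤ m := by omega
    rw [divisors_eq m hm1, List.foldl_filter]
    refine PySem.List.foldl_congr_mem _ _ _ _ ?_
    intro acc x hx
    rw [PySem.List.mem_pyRange_one] at hx
    by_cases hdv : PySem.Int.mod m x = 0
    · rw [if_pos (by simpa using hdv), step_eq m x hm1 (by omega) (by omega) hdv]
    · rw [if_neg (by simpa using hdv), pvAStep, if_neg hdv]
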